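-- pv_equiv track=rewrite | github.com/sherwinsathish/Projects | goaiagent.py | dfs
-- ===== SOURCE A (Python) =====
-- def dfs(board, x, y, player, visited):
--     if (x, y) in visited:
--         return False
--     visited.add((x, y))#so no repeats
--     directions = [(-1, 0), (1, 0), (0, -1), (0, 1)] #orthogonal directions
--     for dx, dy in directions:
--         nx, ny = x + dx, y + dy
--         if 0 <= nx < len(board) and 0 <= ny < len(board): # within board bounds
--             if board[nx][ny] == 0:
--                 return True
--             if board[nx][ny] == player and dfs(board, nx, ny, player, visited): #adjacent piece
--                 return True
--     return False
-- ===== SOURCE B (Python) =====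
-- def dfs(board, x, y, player, visited):
--     # Iterative DFS with an explicit stack of (cell, next-direction-index) frames.
--     # Mutates `visited` exactly as the recursive version does (same cells, same order).
--     if (x, y) in visited:
--         return False
--     visited.add((x, y))
--     n = len(board)
--     dirs = [(-1, 0), (1, 0), (0, -1), (0, 1)]
--     cx, cy, i = x, y, 0
--     stack = []
--     while True:
--         while i < 4:
--             dx, dy = dirs[i]
--             i += 1
--             nx, ny = cx + dx, cy + dy
--             if 0 <= nx < n and 0 <= ny < n:
--                 cell = board[nx][ny]
--                 if cell == 0:
--                     return True
--                 if cell == player and (nx, ny) not in visited: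
--                     visited.add((nx, ny))
--                     stack.append((cx, cy, i))
--                     cx, cy, i = nx, ny, 0
--         if not stack:
--             return False
--         cx, cy, i = stack.pop()
-- ===== Notes on version B (the rewrite author's own statement) =====
-- stated objective: alternative
-- what changed: The recursive DFS is replaced by an iterative DFS driven by an explicit stack of (cell, next-direction-index) frames, preserving preorder visitation, the first-empty early return and the exact visited mutation.
-- outside the precondition, e.g. on dfs([[1, 0], [5]], 0, 0, 1, set()): A returns True, B returns True
import Mathlib
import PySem

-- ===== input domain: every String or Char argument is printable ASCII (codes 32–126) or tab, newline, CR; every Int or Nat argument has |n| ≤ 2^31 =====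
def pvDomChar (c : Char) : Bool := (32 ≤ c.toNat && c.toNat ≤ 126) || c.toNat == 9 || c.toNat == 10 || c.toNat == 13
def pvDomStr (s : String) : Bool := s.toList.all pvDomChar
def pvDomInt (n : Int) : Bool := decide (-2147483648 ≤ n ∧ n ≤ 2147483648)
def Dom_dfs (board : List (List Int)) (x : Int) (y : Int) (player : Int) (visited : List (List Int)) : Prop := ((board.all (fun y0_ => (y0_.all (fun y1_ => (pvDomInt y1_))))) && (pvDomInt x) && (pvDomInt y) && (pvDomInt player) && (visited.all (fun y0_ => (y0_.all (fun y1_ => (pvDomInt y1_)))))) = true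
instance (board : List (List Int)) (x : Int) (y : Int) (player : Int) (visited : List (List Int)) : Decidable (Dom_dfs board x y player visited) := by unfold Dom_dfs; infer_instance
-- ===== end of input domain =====

-- B replaces the recursive liberty-search DFS by an iterative DFS with an explicit stack of
-- (cell, next-direction-index) frames; equivalence is about the RETURN value (both Pythons also
-- mutate `visited` identically, but that is not part of the Lean claim).


-- ===== PORT A =====
-- the direction list [(-1,0),(1,0),(0,-1),(0,1)]
def pvDirs : List (Int × Int) := [(-1, 0), (1, 0), (0, -1), (0, 1)]

-- board[nx][ny], total form: exact whenever 0 ≤ nx < len(board) and 0 ≤ ny < len(board[nx])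
-- (Python raises IndexError on a too-short row — those inputs are excluded by Pre_dfs)
def cellAt (board : List (List Int)) (nx ny : Int) : Int :=
  PySem.List.pyGetD (PySem.List.pyGetD board nx []) ny 0

-- the `for dx, dy in directions` loop; `child` is the recursive call at one less depth-fuel
def tryA (board : List (List Int)) (player : Int)
    (child : Int → Int → PySem.Set (List Int) → Bool × PySem.Set (List Int))
    (x y : Int) : List (Int × Int) → PySem.Set (List Int) → Bool × PySem.Set (List Int)
  | [], v => (false, v)
  | (dx, dy) :: rest, v =>
    let nx := x + dx
    let ny := y + dy
    if 0 ≤ nx ∧ nx < (board.length : Int) ∧ 0 ≤ ny ∧ ny < (board.length : Int) then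
      let cell := cellAt board nx ny
      if cell = 0 then (true, v)
      else if cell = player then
        let p := child nx ny v
        if p.1 then (true, p.2) else tryA board player child x y rest p.2
      else tryA board player child x y rest v
    else tryA board player child x y rest v

-- the recursive dfs, threading the visited set; fuel = recursion depth (a pure totality guard:
-- the top-level fuel n*n+2 exceeds any reachable depth, since each level adds a fresh cell)
def dfsA (board : List (List Int)) (player : Int) :
    Nat → Int → Int → PySem.Set (List Int) → Bool × PySem.Set (List Int)
  | 0, _, _, v => (false, v)
  | Nat.succ g, x, y, v =>
    if PySem.Set.contains v [x, y] then (false, v)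
    else tryA board player (dfsA board player g) x y pvDirs (PySem.Set.add v [x, y])

def dfs (board : List (List Int)) (x : Int) (y : Int) (player : Int) (visited : List (List Int)) : Bool :=
  (dfsA board player (board.length * board.length + 2) x y (PySem.Set.ofList visited)).1

-- ===== PORT B =====
-- dirs[i]
def pvDir (i : Nat) : Int × Int :=
  match i with
  | 0 => (-1, 0)
  | 1 => (1, 0)
  | 2 => (0, -1)
  | _ => (0, 1)

-- potential of the stack: bounds the number of remaining loop iterations
def pvPhi (stack : List (Int × Int × Nat × Nat)) : Nat :=
  stack.foldr (fun fr acc => (5 - min fr.2.2.1 4) * 6 ^ fr.2.2.2 + acc) 0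

-- the while-loop: top of `stack` is the current frame (cx, cy, i, fuel); the per-frame fuel and
-- the step counter S are pure totality guards mirroring the loop's potential (a frame with fuel 0
-- skips instead of descending — dead under the top-level fuel)
def runBAux (board : List (List Int)) (player : Int) :
    Nat → List (Int × Int × Nat × Nat) → PySem.Set (List Int) → Bool
  | _, [], _ => false
  | 0, _ :: _, _ => false
  | Nat.succ S, (cx, cy, i, f) :: rest, v =>
    if i < 4 then
      let nx := cx + (pvDir i).1
      let ny := cy + (pvDir i).2
      if 0 ≤ nx ∧ nx < (board.length : Int) ∧ 0 ≤ ny ∧ ny < (board.length : Int) then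
        let cell := cellAt board nx ny
        if cell = 0 then true
        else if cell = player ∧ ¬ PySem.Set.contains v [nx, ny] then
          if f = 0 then runBAux board player S ((cx, cy, i + 1, 0) :: rest) v
          else
            runBAux board player S ((nx, ny, 0, f - 1) :: (cx, cy, i + 1, f) :: rest)
              (PySem.Set.add v [nx, ny])
        else runBAux board player S ((cx, cy, i + 1, f) :: rest) v
      else runBAux board player S ((cx, cy, i + 1, f) :: rest) v
    else runBAux board player S rest v

def runB (board : List (List Int)) (player : Int)
    (stack : List (Int × Int × Nat × Nat)) (v : PySem.Set (List Int)) : Bool :=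
  runBAux board player (pvPhi stack + 1) stack v

def dfs_alt (board : List (List Int)) (x : Int) (y : Int) (player : Int) (visited : List (List Int)) : Bool :=
  let v := PySem.Set.ofList visited
  if PySem.Set.contains v [x, y] then false
  else runB board player [(x, y, 0, board.length * board.length + 1)] (PySem.Set.add v [x, y])

-- ===== PRECONDITION & SPEC =====
-- Pre_dfs excludes inputs on which Python A raises IndexError by reading board[nx][ny] on a row
-- shorter than len(board); it keeps every board whose rows all have length ≥ len(board), plus two
-- cases where no cell is ever read: the start already visited, or no neighbour of the start inside
-- the board. It is sufficient, not exact: a ragged board on which A happens to return before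
-- touching a short row is also excluded.
def Pre_dfs (board : List (List Int)) (x : Int) (y : Int) (player : Int) (visited : List (List Int)) : Prop :=
  (∀ row ∈ board, board.length ≤ row.length) ∨ [x, y] ∈ visited ∨
    (∀ d ∈ ([((-1 : Int), (0 : Int)), (1, 0), (0, -1), (0, 1)] : List (Int × Int)),
      ¬ (0 ≤ x + d.1 ∧ x + d.1 < (board.length : Int) ∧ 0 ≤ y + d.2 ∧ y + d.2 < (board.length : Int)))
instance (board : List (List Int)) (x : Int) (y : Int) (player : Int) (visited : List (List Int)) : Decidable (Pre_dfs board x y player visited) := by unfold Pre_dfs; infer_instance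

def pvWitness_dfs : List (List Int) × Int × Int × Int × List (List Int) :=
  ([[1, 1], [1, 0]], 0, 0, 1, [])

def Spec_dfs (board : List (List Int)) (x : Int) (y : Int) (player : Int) (visited : List (List Int)) (out : Bool) : Prop := out = dfs_alt board x y player visited
instance (board : List (List Int)) (x : Int) (y : Int) (player : Int) (visited : List (List Int)) (out : Bool) : Decidable (Spec_dfs board x y player visited out) := by unfold Spec_dfs; infer_instance

-- ===== CLAIM (what is proved, stated in full; the proofs are below) =====
def Claim_equal_dfs : Prop := ∀ (board : List (List Int)) (x : Int) (y : Int) (player : Int) (visited : List (List Int)), Dom_dfs board x y player visited → Pre_dfs board x y player visited → Spec_dfs board x y player visited (dfs board x y player visited)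

-- ===== LEMMAS AND PROOFS =====

-- facts about pvPhi cited by the proofs below
lemma pvPow6_pos (f : Nat) : 0 < 6 ^ f := Nat.pow_pos (by omega)

lemma pvStep_lt (i f : Nat) (hi : i < 4) :
    (5 - min (i + 1) 4) * 6 ^ f < (5 - min i 4) * 6 ^ f := by
  have hp := pvPow6_pos f
  have h1 : min (i + 1) 4 = i + 1 := by omega
  have h2 : min i 4 = i := by omega
  rw [h1, h2]
  exact (Nat.mul_lt_mul_right hp).mpr (by omega)

lemma pvPush_lt (i g : Nat) (hi : i < 4) :
    (5 - min 0 4) * 6 ^ g + (5 - min (i + 1) 4) * 6 ^ (g + 1) < (5 - min i 4) * 6 ^ (g + 1) := by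
  have hp := pvPow6_pos g
  have h1 : min (i + 1) 4 = i + 1 := by omega
  have h2 : min i 4 = i := by omega
  have h0 : min 0 4 = 0 := rfl
  rw [h0, h1, h2, pow_succ]
  have h3 : (5 - i) = (5 - (i + 1)) + 1 := by omega
  rw [h3, Nat.add_mul, Nat.one_mul]
  omega

lemma pvPush_lt' (i f : Nat) (hi : i < 4) (hf : f ≠ 0) :
    (5 - min 0 4) * 6 ^ (f - 1) + (5 - min (i + 1) 4) * 6 ^ f < (5 - min i 4) * 6 ^ f := by
  obtain ⟨g, rfl⟩ := Nat.exists_eq_succ_of_ne_zero hf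
  simpa using pvPush_lt i g hi

-- the direction list seen from index i
lemma pvDirs_drop_succ (i : Nat) (hi : i < 4) :
    pvDirs.drop i = pvDir i :: pvDirs.drop (i + 1) := by
  interval_cases i <;> rfl

lemma pvDirs_drop_ge (i : Nat) (hi : ¬ i < 4) : pvDirs.drop i = [] := by
  apply List.drop_eq_nil_of_le; simp [pvDirs]; omega

-- step-counter irrelevance: any two sufficient step counters give the same run
lemma runBAux_congr (board : List (List Int)) (player : Int) :
    ∀ (S1 S2 : Nat) (stack : List (Int × Int × Nat × Nat)) (v : PySem.Set (List Int)),
      pvPhi stack < S1 → pvPhi stack < S2 →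
      runBAux board player S1 stack v = runBAux board player S2 stack v := by
  intro S1
  induction S1 with
  | zero => intro S2 stack v h1 h2; exact absurd h1 (by omega)
  | succ S ih =>
    intro S2 stack v h1 h2
    match stack with
    | [] => cases S2 <;> rfl
    | (cx, cy, i, f) :: rest =>
      cases S2 with
      | zero => exact absurd h2 (by omega)
      | succ T =>
        rw [runBAux, runBAux]
        simp only
        have hphi : pvPhi ((cx, cy, i, f) :: rest) = (5 - min i 4) * 6 ^ f + pvPhi rest := rfl
        by_cases hi : i < 4
        · rw [if_pos hi, if_pos hi]
          by_cases hb : 0 ≤ cx + (pvDir i).1 ∧ cx + (pvDir i).1 < (board.length : Int) ∧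
              0 ≤ cy + (pvDir i).2 ∧ cy + (pvDir i).2 < (board.length : Int)
          · rw [if_pos hb, if_pos hb]
            by_cases hc0 : cellAt board (cx + (pvDir i).1) (cy + (pvDir i).2) = 0
            · rw [if_pos hc0, if_pos hc0]
            · rw [if_neg hc0, if_neg hc0]
              by_cases hpm : cellAt board (cx + (pvDir i).1) (cy + (pvDir i).2) = player ∧
                  ¬ PySem.Set.contains v [cx + (pvDir i).1, cy + (pvDir i).2] = true
              · rw [if_pos hpm, if_pos hpm]
                by_cases hf : f = 0
                · rw [if_pos hf, if_pos hf]
                  subst hf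
                  have hlt : pvPhi ((cx, cy, i + 1, 0) :: rest) < pvPhi ((cx, cy, i, 0) :: rest) := by
                    have := pvStep_lt i 0 hi
                    simp only [pvPhi, List.foldr]
                    omega
                  exact ih T _ _ (by omega) (by omega)
                · rw [if_neg hf, if_neg hf]
                  have hlt : pvPhi ((cx + (pvDir i).1, cy + (pvDir i).2, 0, f - 1) ::
                      (cx, cy, i + 1, f) :: rest) < pvPhi ((cx, cy, i, f) :: rest) := by
                    have := pvPush_lt' i f hi hf
                    simp only [pvPhi, List.foldr]
                    omega
                  exact ih T _ _ (by omega) (by omega)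
              · rw [if_neg hpm, if_neg hpm]
                have hlt : pvPhi ((cx, cy, i + 1, f) :: rest) < pvPhi ((cx, cy, i, f) :: rest) := by
                  have := pvStep_lt i f hi
                  simp only [pvPhi, List.foldr]
                  omega
                exact ih T _ _ (by omega) (by omega)
          · rw [if_neg hb, if_neg hb]
            have hlt : pvPhi ((cx, cy, i + 1, f) :: rest) < pvPhi ((cx, cy, i, f) :: rest) := by
              have := pvStep_lt i f hi
              simp only [pvPhi, List.foldr]
              omega
            exact ih T _ _ (by omega) (by omega)
        · rw [if_neg hi, if_neg hi]
          have hlt : pvPhi rest < pvPhi ((cx, cy, i, f) :: rest) := by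
            have := Nat.mul_pos (show 0 < 5 - min i 4 by omega) (pvPow6_pos f)
            simp only [pvPhi, List.foldr]
            omega
          exact ih T _ _ (by omega) (by omega)

lemma runB_nil (board : List (List Int)) (player : Int) (v : PySem.Set (List Int)) :
    runB board player [] v = false := rfl

-- one unfolding of the loop, in terms of runB itself
lemma runB_unfold (board : List (List Int)) (player : Int) (cx cy : Int) (i f : Nat)
    (rest : List (Int × Int × Nat × Nat)) (v : PySem.Set (List Int)) :
    runB board player ((cx, cy, i, f) :: rest) v =
      (if i < 4 then
        if 0 ≤ cx + (pvDir i).1 ∧ cx + (pvDir i).1 < (board.length : Int) ∧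
            0 ≤ cy + (pvDir i).2 ∧ cy + (pvDir i).2 < (board.length : Int) then
          if cellAt board (cx + (pvDir i).1) (cy + (pvDir i).2) = 0 then true
          else if cellAt board (cx + (pvDir i).1) (cy + (pvDir i).2) = player ∧
              ¬ PySem.Set.contains v [cx + (pvDir i).1, cy + (pvDir i).2] then
            if f = 0 then runB board player ((cx, cy, i + 1, 0) :: rest) v
            else
              runB board player ((cx + (pvDir i).1, cy + (pvDir i).2, 0, f - 1) ::
                  (cx, cy, i + 1, f) :: rest)
                (PySem.Set.add v [cx + (pvDir i).1, cy + (pvDir i).2])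
          else runB board player ((cx, cy, i + 1, f) :: rest) v
        else runB board player ((cx, cy, i + 1, f) :: rest) v
      else runB board player rest v) := by
  conv_lhs => rw [runB]
  rw [runBAux]
  simp only
  unfold runB
  by_cases hi : i < 4
  · rw [if_pos hi, if_pos hi]
    by_cases hb : 0 ≤ cx + (pvDir i).1 ∧ cx + (pvDir i).1 < (board.length : Int) ∧
        0 ≤ cy + (pvDir i).2 ∧ cy + (pvDir i).2 < (board.length : Int)
    · rw [if_pos hb, if_pos hb]
      by_cases hc0 : cellAt board (cx + (pvDir i).1) (cy + (pvDir i).2) = 0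
      · rw [if_pos hc0, if_pos hc0]
      · rw [if_neg hc0, if_neg hc0]
        by_cases hpm : cellAt board (cx + (pvDir i).1) (cy + (pvDir i).2) = player ∧
            ¬ PySem.Set.contains v [cx + (pvDir i).1, cy + (pvDir i).2] = true
        · rw [if_pos hpm, if_pos hpm]
          by_cases hf : f = 0
          · rw [if_pos hf, if_pos hf]
            subst hf
            have hlt : pvPhi ((cx, cy, i + 1, 0) :: rest) < pvPhi ((cx, cy, i, 0) :: rest) := by
              have := pvStep_lt i 0 hi
              simp only [pvPhi, List.foldr]
              omega
            exact runBAux_congr board player _ _ _ _ (by omega) (by omega)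
          · rw [if_neg hf, if_neg hf]
            have hlt : pvPhi ((cx + (pvDir i).1, cy + (pvDir i).2, 0, f - 1) ::
                (cx, cy, i + 1, f) :: rest) < pvPhi ((cx, cy, i, f) :: rest) := by
              have := pvPush_lt' i f hi hf
              simp only [pvPhi, List.foldr]
              omega
            exact runBAux_congr board player _ _ _ _ (by omega) (by omega)
        · rw [if_neg hpm, if_neg hpm]
          have hlt : pvPhi ((cx, cy, i + 1, f) :: rest) < pvPhi ((cx, cy, i, f) :: rest) := by
            have := pvStep_lt i f hi
            simp only [pvPhi, List.foldr]
            omega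
          exact runBAux_congr board player _ _ _ _ (by omega) (by omega)
    · rw [if_neg hb, if_neg hb]
      have hlt : pvPhi ((cx, cy, i + 1, f) :: rest) < pvPhi ((cx, cy, i, f) :: rest) := by
        have := pvStep_lt i f hi
        simp only [pvPhi, List.foldr]
        omega
      exact runBAux_congr board player _ _ _ _ (by omega) (by omega)
  · rw [if_neg hi, if_neg hi]
    have hlt : pvPhi rest < pvPhi ((cx, cy, i, f) :: rest) := by
      have := Nat.mul_pos (show 0 < 5 - min i 4 by omega) (pvPow6_pos f)
      simp only [pvPhi, List.foldr]
      omega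
    exact runBAux_congr board player _ _ _ _ (by omega) (by omega)

-- SIMULATION: a frame (x, y, i, f) on top of the stack behaves exactly like the recursive
-- direction loop from index i at depth-fuel f, then falls back to the rest of the stack with the
-- visited set the loop produced.
lemma runB_sim (board : List (List Int)) (player : Int) :
    ∀ (n f i : Nat) (x y : Int) (v : PySem.Set (List Int)) (rest : List (Int × Int × Nat × Nat)),
      5 * f + (4 - i) ≤ n →
      runB board player ((x, y, i, f) :: rest) v =
        (let p := tryA board player (dfsA board player f) x y (pvDirs.drop i) v
         if p.1 then true else runB board player rest p.2) := by
  intro n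
  induction n with
  | zero =>
    intro f i x y v rest hn
    have hi : ¬ i < 4 := by omega
    rw [runB_unfold, if_neg hi]
    rw [pvDirs_drop_ge i hi]
    simp [tryA]
  | succ m ih =>
    intro f i x y v rest hn
    by_cases hi : i < 4
    · rw [pvDirs_drop_succ i hi, runB_unfold, if_pos hi]
      rw [tryA]
      simp only
      by_cases hb : 0 ≤ x + (pvDir i).1 ∧ x + (pvDir i).1 < (board.length : Int) ∧
          0 ≤ y + (pvDir i).2 ∧ y + (pvDir i).2 < (board.length : Int)
      · rw [if_pos hb, if_pos hb]
        by_cases hc0 : cellAt board (x + (pvDir i).1) (y + (pvDir i).2) = 0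
        · rw [if_pos hc0, if_pos hc0]
          simp
        · rw [if_neg hc0, if_neg hc0]
          by_cases hcp : cellAt board (x + (pvDir i).1) (y + (pvDir i).2) = player
          · rw [if_pos hcp]
            by_cases hm : PySem.Set.contains v [x + (pvDir i).1, y + (pvDir i).2] = true
            · -- neighbour already visited: the recursive child returns (false, v) immediately
              have hm' : [x + (pvDir i).1, y + (pvDir i).2] ∈ v := by
                simpa [PySem.Set.contains] using hm
              have hchild : dfsA board player f (x + (pvDir i).1) (y + (pvDir i).2) v = (false, v) := by
                cases f with
                | zero => rfl
                | succ g => simp [dfsA, hm']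
              rw [if_neg (by simp [PySem.Set.contains, hm'] :
                    ¬ (cellAt board (x + (pvDir i).1) (y + (pvDir i).2) = player ∧
                    ¬ PySem.Set.contains v [x + (pvDir i).1, y + (pvDir i).2] = true))]
              rw [hchild]
              simpa using ih f (i + 1) x y v rest (by omega)
            · have hm' : [x + (pvDir i).1, y + (pvDir i).2] ∉ v := by
                simpa [PySem.Set.contains] using hm
              rw [if_pos ⟨hcp, hm⟩]
              by_cases hf : f = 0
              · -- depth-fuel exhausted: the child is (false, v) and B skips (dead under top fuel)
                subst hf
                rw [if_pos rfl]
                simpa [dfsA] using ih 0 (i + 1) x y v rest (by omega)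
              · rw [if_neg hf]
                obtain ⟨g, rfl⟩ := Nat.exists_eq_succ_of_ne_zero hf
                have hchild : dfsA board player (g + 1) (x + (pvDir i).1) (y + (pvDir i).2) v =
                    tryA board player (dfsA board player g) (x + (pvDir i).1) (y + (pvDir i).2)
                      pvDirs (PySem.Set.add v [x + (pvDir i).1, y + (pvDir i).2]) := by
                  simp [dfsA, hm']
                rw [show (Nat.succ g - 1) = g from rfl]
                rw [ih g 0 (x + (pvDir i).1) (y + (pvDir i).2)
                      (PySem.Set.add v [x + (pvDir i).1, y + (pvDir i).2])
                      ((x, y, i + 1, Nat.succ g) :: rest) (by omega)]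
                simp only [Nat.succ_eq_add_one, hchild, List.drop_zero]
                set p := tryA board player (dfsA board player g) (x + (pvDir i).1) (y + (pvDir i).2)
                      pvDirs (PySem.Set.add v [x + (pvDir i).1, y + (pvDir i).2]) with hp
                by_cases hr : p.1
                · simp [hr]
                · simp only [hr, Bool.false_eq_true, if_false]
                  simpa using ih (g + 1) (i + 1) x y p.2 rest (by omega)
          · rw [if_neg hcp]
            rw [if_neg (by simp [hcp] : ¬ (cellAt board (x + (pvDir i).1) (y + (pvDir i).2) = player ∧
                  ¬ PySem.Set.contains v [x + (pvDir i).1, y + (pvDir i).2] = true))]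
            simpa using ih f (i + 1) x y v rest (by omega)
      · rw [if_neg hb, if_neg hb]
        simpa using ih f (i + 1) x y v rest (by omega)
    · rw [runB_unfold, if_neg hi]
      rw [pvDirs_drop_ge i hi]
      simp [tryA]

-- `if b then true else false = b`
lemma bool_if_id (b : Bool) : (if b = true then true else false) = b := by cases b <;> rfl

-- ===== VERDICT (by name: the statement is the Claim_ definition above) =====
theorem dfs_spec : Claim_equal_dfs := by
  intro board x y player visited _ _
  unfold Spec_dfs dfs dfs_alt
  simp only []
  rw [show board.length * board.length + 2 = (board.length * board.length + 1) + 1 from rfl]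
  rw [dfsA]
  by_cases hm : PySem.Set.contains (PySem.Set.ofList visited) [x, y] = true
  · rw [if_pos hm, if_pos hm]
  · rw [if_neg hm, if_neg hm]
    rw [runB_sim board player (5 * (board.length * board.length + 1) + 4)
          (board.length * board.length + 1) 0 x y
          (PySem.Set.add (PySem.Set.ofList visited) [x, y]) [] (by omega)]
    simp only [List.drop_zero]
    rw [runB_nil]
    rw [bool_if_id]
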